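-- pv_equiv track=rewrite | github.com/nccgroup/Sniffle | python_cli/sniffle/coding_ble.py | fec_ble_encode_int
-- ===== SOURCE A (Python) =====
-- def fec_ble_encode_int(data: int, nbits: int, state=0):
--     output = 0
--     for i in range(nbits):
--         b = data & 1
--         data >>= 1
--         s2 = state & 0x1
--         s1 = (state >> 1) & 0x1
--         s0 = state >> 2
--         a1 = b ^ s1 ^ s2
--         a0 = a1 ^ s0
--         output |= (a0 << 2*i) | (a1 << 2*i + 1)
--         state = (state >> 1) | (b << 2)
--     return output
-- ===== SOURCE B (Python) =====
-- def fec_ble_encode_int(data: int, nbits: int, state=0):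
--     # Windowed re-computation: no rolling shift-register; each output bit pair
--     # is an XOR/OR window over the current input bit, up to three past input
--     # bits, and the shifted-down remnant of the initial state.
--     output = 0
--     for i in range(nbits):
--         b = (data >> i) & 1
--         s2 = ((state >> i) & 1) | ((data >> (i - 3)) & 1 if i >= 3 else 0)
--         s1 = ((state >> (i + 1)) & 1) | ((data >> (i - 2)) & 1 if i >= 2 else 0)
--         s0 = (state >> (i + 2)) | ((data >> (i - 1)) & 1 if i >= 1 else 0)
--         a1 = b ^ s1 ^ s2
--         a0 = a1 ^ s0
--         output |= (a0 << 2 * i) | (a1 << (2 * i + 1))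
--     return output
-- ===== Notes on version B (the rewrite author's own statement) =====
-- stated objective: alternative
-- what changed: B eliminates A's rolling 3-bit shift-register: each output bit pair is computed independently from the indexed current input bit, up to three past input bits, and the shifted-down remnant of the initial state.
import Mathlib
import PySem

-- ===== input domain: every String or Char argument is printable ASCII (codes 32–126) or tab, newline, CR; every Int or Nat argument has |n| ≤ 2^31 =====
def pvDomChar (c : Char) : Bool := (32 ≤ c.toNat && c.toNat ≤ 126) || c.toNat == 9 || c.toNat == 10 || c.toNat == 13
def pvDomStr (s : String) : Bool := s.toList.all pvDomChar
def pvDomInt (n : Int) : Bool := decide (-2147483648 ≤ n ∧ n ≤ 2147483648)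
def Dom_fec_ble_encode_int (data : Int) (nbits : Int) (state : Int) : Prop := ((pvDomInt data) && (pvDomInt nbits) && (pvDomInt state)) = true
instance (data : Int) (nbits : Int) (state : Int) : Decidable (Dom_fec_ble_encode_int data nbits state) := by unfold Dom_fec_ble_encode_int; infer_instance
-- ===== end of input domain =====

-- ===== PORT A =====
-- B differs from A by removing the rolling 3-bit shift-register: same return value, alternative decomposition.
-- A-side helper: the loop body of A (output, data, state are the mutated locals).
-- Shift counts (2*i).toNat / (2*i+1).toNat are exact: i comes from range(nbits), so 0 ≤ i.
def pvStepA (acc : Int × Int × Int) (i : Int) : Int × Int × Int :=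
  let output := acc.1
  let data := acc.2.1
  let state := acc.2.2
  let b := PySem.Int.band data 1
  let data := data >>> (1 : Nat)
  let s2 := PySem.Int.band state 1
  let s1 := PySem.Int.band (state >>> (1 : Nat)) 1
  let s0 := state >>> (2 : Nat)
  let a1 := PySem.Int.bxor (PySem.Int.bxor b s1) s2
  let a0 := PySem.Int.bxor a1 s0
  let output := PySem.Int.bor output (PySem.Int.bor (a0 <<< (2 * i).toNat) (a1 <<< (2 * i + 1).toNat))
  (output, data, PySem.Int.bor (state >>> (1 : Nat)) (b <<< (2 : Nat)))

def fec_ble_encode_int (data : Int) (nbits : Int) (state : Int) : Int :=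
  ((PySem.List.pyRange 0 nbits 1).foldl pvStepA (0, data, state)).1

-- ===== PORT B =====
-- B-side helper: the loop body of B (only `output` is carried; bits are read by index).
def pvStepB (data : Int) (state : Int) (output : Int) (i : Int) : Int :=
  let b := PySem.Int.band (data >>> i.toNat) 1
  let s2 := PySem.Int.bor (PySem.Int.band (state >>> i.toNat) 1)
      (if 3 ≤ i then PySem.Int.band (data >>> (i - 3).toNat) 1 else 0)
  let s1 := PySem.Int.bor (PySem.Int.band (state >>> (i + 1).toNat) 1)
      (if 2 ≤ i then PySem.Int.band (data >>> (i - 2).toNat) 1 else 0)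
  let s0 := PySem.Int.bor (state >>> (i + 2).toNat)
      (if 1 ≤ i then PySem.Int.band (data >>> (i - 1).toNat) 1 else 0)
  let a1 := PySem.Int.bxor (PySem.Int.bxor b s1) s2
  let a0 := PySem.Int.bxor a1 s0
  PySem.Int.bor output (PySem.Int.bor (a0 <<< (2 * i).toNat) (a1 <<< (2 * i + 1).toNat))

def fec_ble_encode_int_alt (data : Int) (nbits : Int) (state : Int) : Int :=
  (PySem.List.pyRange 0 nbits 1).foldl (pvStepB data state) 0

-- ===== PRECONDITION & SPEC =====
def Spec_fec_ble_encode_int (data : Int) (nbits : Int) (state : Int) (out : Int) : Prop := out = fec_ble_encode_int_alt data nbits state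
instance (data : Int) (nbits : Int) (state : Int) (out : Int) : Decidable (Spec_fec_ble_encode_int data nbits state out) := by unfold Spec_fec_ble_encode_int; infer_instance

-- ===== CLAIM (what is proved, stated in full; the proofs are below) =====
def Claim_equal_fec_ble_encode_int : Prop := ∀ (data : Int) (nbits : Int) (state : Int), Dom_fec_ble_encode_int data nbits state → Spec_fec_ble_encode_int data nbits state (fec_ble_encode_int data nbits state)

-- ===== LEMMAS AND PROOFS =====

-- ---- generic integer bit lemmas (Python two's-complement semantics) ----

theorem pvLdiff_div_two (m n : Nat) : (m.ldiff n) / 2 = (m/2).ldiff (n/2) := by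
  apply Nat.eq_of_testBit_eq; intro k
  simp [Nat.testBit_div_two, Nat.testBit_ldiff]

theorem pvLdiff_mod_two (m n : Nat) : (m.ldiff n) % 2 = 1 ↔ (m % 2 = 1 ∧ n % 2 = 0) := by
  have h := Nat.testBit_ldiff m n 0
  simp only [Nat.testBit_zero] at h
  by_cases h1 : m % 2 = 1 <;> by_cases h2 : n % 2 = 1 <;> simp [h1, h2] at h <;> omega

-- m - (m AND n) is the bitwise difference (used to relate PySem's ops to Int.lor/land)
theorem pvSub_and (m n : Nat) : m - (m &&& n) = m.ldiff n := by
  induction m using Nat.strong_induction_on generalizing n with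
  | _ m IH =>
    match m with
    | 0 =>
      have : Nat.ldiff 0 n = 0 := Nat.eq_of_testBit_eq (fun i => by simp [Nat.testBit_ldiff])
      simp [this]
    | (m+1) =>
      have IH1 := IH ((m+1)/2) (by omega) (n/2)
      have f1 : ((m+1) &&& n)/2 = (m+1)/2 &&& n/2 := by
        simpa using @Nat.and_div_two_pow (m+1) n 1
      have f2 := @Nat.and_mod_two_eq_one (m+1) n
      have f3 := pvLdiff_div_two (m+1) n
      have f4 := pvLdiff_mod_two (m+1) n
      have f5 : (m+1) &&& n ≤ (m+1) := Nat.and_le_left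
      have f6 : (m+1)/2 &&& n/2 ≤ (m+1)/2 := Nat.and_le_left
      omega

theorem pvTestBit_ext {a b : Int} (h : ∀ k : Nat, a.testBit k = b.testBit k) : a = b := by
  cases a with
  | ofNat m =>
    cases b with
    | ofNat n =>
      have := Nat.eq_of_testBit_eq (x := m) (y := n) (fun i => by simpa [Int.testBit] using h i)
      simp [this]
    | negSucc n =>
      exfalso
      have hk := h (m + n)
      have h1 : m.testBit (m + n) = false := Nat.testBit_lt_two_pow (lt_of_lt_of_le Nat.lt_two_pow_self (Nat.pow_le_pow_right (by norm_num) (by omega)))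
      have h2 : n.testBit (m + n) = false := Nat.testBit_lt_two_pow (lt_of_lt_of_le Nat.lt_two_pow_self (Nat.pow_le_pow_right (by norm_num) (by omega)))
      simp [Int.testBit, h1, h2] at hk
  | negSucc m =>
    cases b with
    | negSucc n =>
      have := Nat.eq_of_testBit_eq (x := m) (y := n) (fun i => by
        have := h i; simp [Int.testBit] at this; exact this)
      simp [this]
    | ofNat n =>
      exfalso
      have hk := h (m + n)
      have h1 : m.testBit (m + n) = false := Nat.testBit_lt_two_pow (lt_of_lt_of_le Nat.lt_two_pow_self (Nat.pow_le_pow_right (by norm_num) (by omega)))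
      have h2 : n.testBit (m + n) = false := Nat.testBit_lt_two_pow (lt_of_lt_of_le Nat.lt_two_pow_self (Nat.pow_le_pow_right (by norm_num) (by omega)))
      simp [Int.testBit, h1, h2] at hk

theorem pvBor_eq_lor (a b : Int) : PySem.Int.bor a b = Int.lor a b := by
  cases a with
  | ofNat m =>
    cases b with
    | ofNat n => simp [PySem.Int.bor, Int.lor]
    | negSucc n =>
      simp [PySem.Int.bor, Int.lor, Int.negSucc_eq, pvSub_and]
      omega
  | negSucc m =>
    cases b with
    | ofNat n =>
      simp [PySem.Int.bor, Int.lor, Int.negSucc_eq, pvSub_and]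
      omega
    | negSucc n =>
      simp [PySem.Int.bor, Int.lor, Int.negSucc_eq]
      omega

theorem pvBand_eq_land (a b : Int) : PySem.Int.band a b = Int.land a b := by
  cases a with
  | ofNat m =>
    cases b with
    | ofNat n => simp [PySem.Int.band, Int.land]
    | negSucc n =>
      simp [PySem.Int.band, Int.land, Int.negSucc_eq, pvSub_and]
      intro h; exfalso; omega
  | negSucc m =>
    cases b with
    | ofNat n =>
      simp [PySem.Int.band, Int.land, Int.negSucc_eq, pvSub_and]
      intro h; exfalso; omega
    | negSucc n =>
      simp [PySem.Int.band, Int.land, Int.negSucc_eq]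
      omega

theorem pvTestBit_shiftRight (a : Int) (n k : Nat) : (a >>> n).testBit k = a.testBit (n + k) := by
  cases a with
  | ofNat m =>
    show (Int.ofNat (m >>> n)).testBit k = _
    simp [Int.testBit, Nat.testBit_shiftRight]
  | negSucc m =>
    show (Int.negSucc (m >>> n)).testBit k = _
    simp [Int.testBit, Nat.testBit_shiftRight]

theorem pvTestBit_one (k : Nat) : (1 : Int).testBit k = decide (k = 0) := by
  show (Int.ofNat 1).testBit k = _
  cases k with
  | zero => decide
  | succ k => simp [Int.testBit, Nat.testBit_succ]

-- OR distributes over arithmetic right shift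
theorem pvBor_shiftRight (x y : Int) (n : Nat) :
    PySem.Int.bor x y >>> n = PySem.Int.bor (x >>> n) (y >>> n) := by
  apply pvTestBit_ext; intro k
  simp [pvBor_eq_lor, Int.testBit_lor, pvTestBit_shiftRight]

-- low bit of an OR
theorem pvBand_bor_one (x y : Int) :
    PySem.Int.band (PySem.Int.bor x y) 1 = PySem.Int.bor (PySem.Int.band x 1) (PySem.Int.band y 1) := by
  apply pvTestBit_ext; intro k
  simp [pvBor_eq_lor, pvBand_eq_land, Int.testBit_lor, Int.testBit_land, pvTestBit_one]
  cases Int.testBit x k <;> cases Int.testBit y k <;> simp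

-- ---- bit-valued helpers ----

-- the j-th bit of data, 0 for negative j (B reads past input bits this way)
def pvPbit (data : Int) (j : Int) : Int :=
  if 0 ≤ j then PySem.Int.band (data >>> j.toNat) 1 else 0

theorem pvBand_one_cases (x : Int) : PySem.Int.band x 1 = 0 ∨ PySem.Int.band x 1 = 1 := by
  rw [PySem.Int.band_one, PySem.Int.mod_eq_emod_of_pos (by norm_num)]
  omega

theorem pvPbit_cases (d j : Int) : pvPbit d j = 0 ∨ pvPbit d j = 1 := by
  unfold pvPbit; split
  · exact pvBand_one_cases _
  · exact Or.inl rfl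

theorem pvBit_shl1_band1 {x : Int} (h : x = 0 ∨ x = 1) : PySem.Int.band (x <<< (1:Nat)) 1 = 0 := by
  rcases h with h | h <;> subst h <;> decide

theorem pvBit_shl2_band1 {x : Int} (h : x = 0 ∨ x = 1) : PySem.Int.band (x <<< (2:Nat)) 1 = 0 := by
  rcases h with h | h <;> subst h <;> decide

theorem pvBit_band1 {x : Int} (h : x = 0 ∨ x = 1) : PySem.Int.band x 1 = x := by
  rcases h with h | h <;> subst h <;> decide

theorem pvBit_shr1 {x : Int} (h : x = 0 ∨ x = 1) : x >>> (1:Nat) = 0 := by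
  rcases h with h | h <;> subst h <;> decide

theorem pvBit_shr2 {x : Int} (h : x = 0 ∨ x = 1) : x >>> (2:Nat) = 0 := by
  rcases h with h | h <;> subst h <;> decide

theorem pvBit_shl1_shr1 {x : Int} (h : x = 0 ∨ x = 1) : (x <<< (1:Nat)) >>> (1:Nat) = x := by
  rcases h with h | h <;> subst h <;> decide

theorem pvBit_shl2_shr1 {x : Int} (h : x = 0 ∨ x = 1) : (x <<< (2:Nat)) >>> (1:Nat) = x <<< (1:Nat) := by
  rcases h with h | h <;> subst h <;> decide

theorem pvBit_shl2_shr2 {x : Int} (h : x = 0 ∨ x = 1) : (x <<< (2:Nat)) >>> (2:Nat) = x := by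
  rcases h with h | h <;> subst h <;> decide

theorem pvBit_shl1_shr2 {x : Int} (h : x = 0 ∨ x = 1) : (x <<< (1:Nat)) >>> (2:Nat) = 0 := by
  rcases h with h | h <;> subst h <;> decide

-- ---- the register invariant ----

-- closed form of A's shift register before iteration n
def pvReg (data state : Int) (n : Nat) : Int :=
  PySem.Int.bor (PySem.Int.bor (PySem.Int.bor (state >>> n) (pvPbit data ((n : Int) - 3)))
    (pvPbit data ((n : Int) - 2) <<< (1:Nat))) (pvPbit data ((n : Int) - 1) <<< (2:Nat))

theorem pvShr_shr (x : Int) (m n : Nat) : (x >>> m) >>> n = x >>> (m + n) :=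
  (Int.shiftRight_add x m n).symm

theorem pvReg_band1 (d s : Int) (n : Nat) :
    PySem.Int.band (pvReg d s n) 1
      = PySem.Int.bor (PySem.Int.band (s >>> n) 1) (pvPbit d ((n : Int) - 3)) := by
  unfold pvReg
  rw [pvBand_bor_one, pvBand_bor_one, pvBand_bor_one,
    pvBit_shl1_band1 (pvPbit_cases d _), pvBit_shl2_band1 (pvPbit_cases d _),
    pvBit_band1 (pvPbit_cases d _), PySem.Int.bor_zero, PySem.Int.bor_zero]

theorem pvReg_shr1_band1 (d s : Int) (n : Nat) :
    PySem.Int.band (pvReg d s n >>> (1:Nat)) 1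
      = PySem.Int.bor (PySem.Int.band (s >>> (n + 1)) 1) (pvPbit d ((n : Int) - 2)) := by
  unfold pvReg
  rw [pvBor_shiftRight, pvBor_shiftRight, pvBor_shiftRight, pvShr_shr,
    pvBit_shr1 (pvPbit_cases d _), pvBit_shl1_shr1 (pvPbit_cases d _),
    pvBit_shl2_shr1 (pvPbit_cases d _), PySem.Int.bor_zero,
    pvBand_bor_one, pvBand_bor_one,
    pvBit_band1 (pvPbit_cases d _), pvBit_shl1_band1 (pvPbit_cases d _), PySem.Int.bor_zero]

theorem pvReg_shr2 (d s : Int) (n : Nat) :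
    pvReg d s n >>> (2:Nat) = PySem.Int.bor (s >>> (n + 2)) (pvPbit d ((n : Int) - 1)) := by
  unfold pvReg
  rw [pvBor_shiftRight, pvBor_shiftRight, pvBor_shiftRight, pvShr_shr,
    pvBit_shr2 (pvPbit_cases d _), pvBit_shl1_shr2 (pvPbit_cases d _),
    pvBit_shl2_shr2 (pvPbit_cases d _), PySem.Int.bor_zero, PySem.Int.bor_zero]

theorem pvPbit_natCast (d : Int) (n : Nat) : pvPbit d (n : Int) = PySem.Int.band (d >>> n) 1 := by
  unfold pvPbit
  rw [if_pos (by positivity)]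
  norm_num

theorem pvReg_step (d s : Int) (n : Nat) :
    PySem.Int.bor (pvReg d s n >>> (1:Nat)) (PySem.Int.band (d >>> n) 1 <<< (2:Nat))
      = pvReg d s (n + 1) := by
  unfold pvReg
  rw [pvBor_shiftRight, pvBor_shiftRight, pvBor_shiftRight, pvShr_shr,
    pvBit_shr1 (pvPbit_cases d _), pvBit_shl1_shr1 (pvPbit_cases d _),
    pvBit_shl2_shr1 (pvPbit_cases d _), PySem.Int.bor_zero]
  have e3 : ((n + 1 : Nat) : Int) - 3 = (n : Int) - 2 := by push_cast; ring
  have e2 : ((n + 1 : Nat) : Int) - 2 = (n : Int) - 1 := by push_cast; ring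
  have e1 : ((n + 1 : Nat) : Int) - 1 = (n : Int) := by push_cast; ring
  rw [e3, e2, e1, pvPbit_natCast]

theorem pvIf_eq_pbit (d i c : Int) :
    (if c ≤ i then PySem.Int.band (d >>> (i - c).toNat) 1 else 0) = pvPbit d (i - c) := by
  unfold pvPbit
  by_cases h : c ≤ i
  · rw [if_pos h, if_pos (by omega)]
  · rw [if_neg h, if_neg (by omega)]

theorem pvStep_eq (d s o : Int) (n : Nat) :
    pvStepA (o, d >>> n, pvReg d s n) (n : Int)
      = (pvStepB d s o (n : Int), d >>> (n + 1), pvReg d s (n + 1)) := by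
  simp only [pvStepA, pvStepB]
  rw [pvReg_band1, pvReg_shr1_band1, pvReg_shr2, pvReg_step, pvShr_shr,
    pvIf_eq_pbit d (n : Int) 3, pvIf_eq_pbit d (n : Int) 2, pvIf_eq_pbit d (n : Int) 1]
  have h0 : ((n : Int)).toNat = n := by omega
  have h1 : ((n : Int) + 1).toNat = n + 1 := by omega
  have h2 : ((n : Int) + 2).toNat = n + 2 := by omega
  rw [h0, h1, h2]

-- ---- the loop invariant, by induction over the length of the range ----

theorem pvLoop_inv (d s : Int) (n : Nat) :
    List.foldl pvStepA (0, d, s) ((List.range n).map (fun k : Nat => (k : Int)))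
      = (List.foldl (pvStepB d s) 0 ((List.range n).map (fun k : Nat => (k : Int))),
          d >>> n, pvReg d s n) := by
  induction n with
  | zero =>
    simp [pvReg, pvPbit, Int.zero_shiftLeft]
  | succ n ih =>
    rw [List.range_succ, List.map_append, List.foldl_append, List.foldl_append, ih]
    simp only [List.map_cons, List.map_nil, List.foldl_cons, List.foldl_nil]
    rw [pvStep_eq]


-- ===== VERDICT (by name: the statement is the Claim_ definition above) =====
theorem fec_ble_encode_int_spec : Claim_equal_fec_ble_encode_int := by
  intro data nbits state _
  unfold Spec_fec_ble_encode_int fec_ble_encode_int fec_ble_encode_int_alt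
  rw [PySem.List.pyRange_one]
  simp only [sub_zero, zero_add]
  exact congrArg Prod.fst (pvLoop_inv data state nbits.toNat)
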